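-- pv_equiv track=rewrite | github.com/sofiesunde/FinNum | preprocessing/preprocess.py | categoryCount
-- ===== SOURCE A (Python) =====
-- def categoryCount(category):
--     monetary = 0
--     percentage = 0
--     option = 0
--     indicator = 0
--     temporal = 0
--     quantity = 0
--     productNum = 0
--     for i, label in enumerate(category):
--         if 'Monetary' in label:
--             monetary += 1
--
--         elif 'Percentage' in label:
--             percentage += 1
--
--         elif 'Option' in label:
--             option += 1
--
--         elif 'Indicator' in label:
--             indicator += 1
--
--         elif 'Temporal' in label:
--             temporal += 1
--
--         elif 'Quantity' in label:
--             quantity += 1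
--
--         elif 'Product Number' in label:
--             productNum += 1
--
--     categories = [monetary, percentage, option, indicator, temporal, quantity, productNum]
--     return categories
-- ===== SOURCE B (Python) =====
-- KEYWORDS = ['Monetary', 'Percentage', 'Option', 'Indicator', 'Temporal',
--             'Quantity', 'Product Number']
--
--
-- def categoryCount(category):
--     # One counting pass per category: a label counts for keyword i iff it
--     # contains KEYWORDS[i] and none of the earlier keywords (elif priority).
--     return [sum(1 for label in category
--                 if kw in label
--                 and not any(prev in label for prev in KEYWORDS[:i]))
--             for i, kw in enumerate(KEYWORDS)]
-- ===== Notes on version B (the rewrite author's own statement) =====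
-- stated objective: alternative
-- what changed: Instead of one pass dispatching each label through an elif chain into seven counters, B makes one counting pass per category: counts[i] is the number of labels containing keyword i but none of the earlier keywords.
import Mathlib
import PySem

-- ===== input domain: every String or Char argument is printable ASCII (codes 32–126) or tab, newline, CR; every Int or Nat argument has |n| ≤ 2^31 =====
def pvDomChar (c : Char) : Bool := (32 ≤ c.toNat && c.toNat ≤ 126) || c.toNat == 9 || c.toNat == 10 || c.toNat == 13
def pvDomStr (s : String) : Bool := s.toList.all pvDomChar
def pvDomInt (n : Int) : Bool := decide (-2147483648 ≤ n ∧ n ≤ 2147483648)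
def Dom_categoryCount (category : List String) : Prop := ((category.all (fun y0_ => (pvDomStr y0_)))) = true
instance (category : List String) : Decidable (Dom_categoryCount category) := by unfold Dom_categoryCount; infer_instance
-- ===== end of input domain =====

-- B replaces A's single-pass elif dispatch into seven counters by one counting
-- pass per category (label matches keyword i and none earlier); alternative, same cost.


-- ===== PORT A =====
-- seven counters threaded as a 7-tuple through the loop, elif chain in order
def categoryCountStep (st : Int × Int × Int × Int × Int × Int × Int) (label : String) :
    Int × Int × Int × Int × Int × Int × Int :=
  let (m, p, o, i, t, q, pr) := st
  if PySem.Str.isIn "Monetary" label then (m + 1, p, o, i, t, q, pr)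
  else if PySem.Str.isIn "Percentage" label then (m, p + 1, o, i, t, q, pr)
  else if PySem.Str.isIn "Option" label then (m, p, o + 1, i, t, q, pr)
  else if PySem.Str.isIn "Indicator" label then (m, p, o, i + 1, t, q, pr)
  else if PySem.Str.isIn "Temporal" label then (m, p, o, i, t + 1, q, pr)
  else if PySem.Str.isIn "Quantity" label then (m, p, o, i, t, q + 1, pr)
  else if PySem.Str.isIn "Product Number" label then (m, p, o, i, t, q, pr + 1)
  else (m, p, o, i, t, q, pr)

def categoryCount (category : List String) : List Int :=
  let s := category.foldl categoryCountStep (0, 0, 0, 0, 0, 0, 0)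
  [s.1, s.2.1, s.2.2.1, s.2.2.2.1, s.2.2.2.2.1, s.2.2.2.2.2.1, s.2.2.2.2.2.2]

-- ===== PORT B =====
def bKeywords : List String :=
  ["Monetary", "Percentage", "Option", "Indicator", "Temporal", "Quantity", "Product Number"]

-- sum(1 for label in category if kw in label and not any(prev in label for prev in KEYWORDS[:i]))
def bCount (category : List String) (i : Nat) (kw : String) : Int :=
  category.foldl
    (fun acc label =>
      if PySem.Str.isIn kw label &&
         !((bKeywords.take i).any (fun prev => PySem.Str.isIn prev label)) then acc + 1
      else acc) 0

-- enumerate(KEYWORDS): PySem.List.enumerate; its indices are ≥ 0, so i.toNat in the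
-- slice KEYWORDS[:i] is exact here
def categoryCount_alt (category : List String) : List Int :=
  (PySem.List.enumerate bKeywords).map (fun x => bCount category x.1.toNat x.2)

-- ===== PRECONDITION & SPEC =====
def Spec_categoryCount (category : List String) (out : List Int) : Prop := out = categoryCount_alt category
instance (category : List String) (out : List Int) : Decidable (Spec_categoryCount category out) := by unfold Spec_categoryCount; infer_instance

-- ===== CLAIM (what is proved, stated in full; the proofs are below) =====
def Claim_equal_categoryCount : Prop := ∀ (category : List String), Dom_categoryCount category → Spec_categoryCount category (categoryCount category)

-- ===== LEMMAS AND PROOFS =====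
theorem foldl_count_shift (p : String → Bool) (l : List String) (a : Int) :
    l.foldl (fun acc x => if p x then acc + 1 else acc) a
      = a + l.foldl (fun acc x => if p x then acc + 1 else acc) 0 := by
  induction l generalizing a with
  | nil => simp
  | cons hd tl ih =>
    simp only [List.foldl_cons]
    by_cases h : p hd <;> simp only [h, if_true, if_false, Bool.false_eq_true] <;>
      [skip; exact ih a]
    rw [ih (a + 1), ih (0 + 1)]; ring

theorem bCount_cons (hd : String) (tl : List String) (i : Nat) (kw : String) :
    bCount (hd :: tl) i kw =
      (if PySem.Str.isIn kw hd &&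
          !((bKeywords.take i).any (fun prev => PySem.Str.isIn prev hd)) then 1 else 0)
        + bCount tl i kw := by
  simp only [bCount, List.foldl_cons]
  split_ifs with h <;> rw [foldl_count_shift] <;> ring

theorem categoryCount_fold_eq (category : List String) (m p o i t q pr : Int) :
    category.foldl categoryCountStep (m, p, o, i, t, q, pr) =
      (m + bCount category 0 "Monetary",
       p + bCount category 1 "Percentage",
       o + bCount category 2 "Option",
       i + bCount category 3 "Indicator",
       t + bCount category 4 "Temporal",
       q + bCount category 5 "Quantity",
       pr + bCount category 6 "Product Number") := by
  induction category generalizing m p o i t q pr with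
  | nil => simp [bCount]
  | cons hd tl ih =>
    simp only [List.foldl_cons, categoryCountStep]
    split_ifs with h0 h1 h2 h3 h4 h5 h6 <;>
      rw [ih] <;>
      simp only [bCount_cons, bKeywords, List.take, List.any_cons, List.any_nil] <;>
      simp_all <;> ring_nf

-- ===== VERDICT (by name: the statement is the Claim_ definition above) =====
theorem categoryCount_spec : Claim_equal_categoryCount := by
  intro category _
  unfold Spec_categoryCount categoryCount categoryCount_alt bKeywords
  rw [categoryCount_fold_eq]
  simp [PySem.List.enumerate]
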